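-- pv_equiv track=rewrite | github.com/cafune1853/dayu-agent | dayu/fins/processors/bs_def14a_processor.py | _detect_leading_toc_cluster
-- ===== SOURCE A (Python) =====
-- from typing import Optional
--
-- _TOC_CLUSTER_GAP_RATIO = 0.005
--
-- _TOC_CLUSTER_MIN_SIZE = 3
--
-- def _detect_leading_toc_cluster(
--     markers: list[tuple[int, Optional[str]]],
--     text_len: int,
-- ) -> int:
--     """检测 marker 序列的前导聚簇（TOC 模式）。
--
--     从首个 marker 开始，统计连续间距低于阈值的 marker 数量。
--     若连续数量达到 ``_TOC_CLUSTER_MIN_SIZE``，返回聚簇末尾位置；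
--     否则返回 0 表示未检测到聚簇。
--
--     阈值 = 文档长度 × ``_TOC_CLUSTER_GAP_RATIO``（默认 0.5%）。
--     对于典型 300K 文档，阈值约为 1500 字符——TOC 条目间距通常远低于此值，
--     而正文 section 间距通常在数千到数万字符。
--
--     Args:
--         markers: 标记列表。
--         text_len: 文档总长度。
--
--     Returns:
--         TOC 聚簇末尾位置；未检测到返回 0。
--
--     Raises:
--         RuntimeError: 检测失败时抛出。
--     """
--
--     if len(markers) < _TOC_CLUSTER_MIN_SIZE or text_len == 0:
--         return 0
--
--     sorted_markers = sorted(markers, key=lambda x: x[0])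
--     max_gap = int(text_len * _TOC_CLUSTER_GAP_RATIO)
--     # 确保最小间距阈值，避免超短文档误判
--     max_gap = max(max_gap, 200)
--
--     cluster_count = 1
--     for i in range(len(sorted_markers) - 1):
--         gap = sorted_markers[i + 1][0] - sorted_markers[i][0]
--         if gap < max_gap:
--             cluster_count += 1
--         else:
--             break
--
--     if cluster_count >= _TOC_CLUSTER_MIN_SIZE:
--         return sorted_markers[cluster_count - 1][0]
--
--     return 0
-- ===== SOURCE B (Python) =====
-- from typing import Optional
--
-- _TOC_CLUSTER_GAP_RATIO = 0.005
--
-- _TOC_CLUSTER_MIN_SIZE = 3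
--
--
-- def _detect_leading_toc_cluster(
--     markers: list[tuple[int, Optional[str]]],
--     text_len: int,
-- ) -> int:
--     """Selection-based variant: no full sort; repeatedly extract the minimum
--     position while gaps stay small, early-exiting at the first large gap."""
--     if len(markers) < _TOC_CLUSTER_MIN_SIZE or text_len == 0:
--         return 0
--
--     max_gap = max(int(text_len * _TOC_CLUSTER_GAP_RATIO), 200)
--
--     remaining = [pos for pos, _ in markers]
--     prev = min(remaining)
--     remaining.remove(prev)
--     count = 1
--     while remaining:
--         cur = min(remaining)
--         if cur - prev >= max_gap:
--             break
--         remaining.remove(cur)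
--         count += 1
--         prev = cur
--
--     if count >= _TOC_CLUSTER_MIN_SIZE:
--         return prev
--     return 0
-- ===== Notes on version B (the rewrite author's own statement) =====
-- stated objective: alternative
-- what changed: B replaces A's full stable sort of the marker pairs by repeated minimum-extraction (selection) over the bare positions with an early exit at the first large gap, so no sorted list is ever built.
import Mathlib
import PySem

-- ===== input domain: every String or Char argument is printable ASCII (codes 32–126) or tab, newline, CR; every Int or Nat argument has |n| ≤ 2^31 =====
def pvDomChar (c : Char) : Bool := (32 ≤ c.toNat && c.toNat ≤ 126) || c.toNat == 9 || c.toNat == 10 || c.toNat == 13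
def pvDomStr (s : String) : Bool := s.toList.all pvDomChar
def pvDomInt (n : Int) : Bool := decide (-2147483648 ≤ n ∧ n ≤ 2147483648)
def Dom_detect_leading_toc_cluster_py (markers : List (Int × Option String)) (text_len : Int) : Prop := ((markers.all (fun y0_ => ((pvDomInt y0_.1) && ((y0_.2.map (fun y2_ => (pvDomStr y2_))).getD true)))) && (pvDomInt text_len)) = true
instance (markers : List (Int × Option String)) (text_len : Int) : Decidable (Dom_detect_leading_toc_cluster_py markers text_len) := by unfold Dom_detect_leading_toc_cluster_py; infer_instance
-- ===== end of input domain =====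

-- B detects the same leading small-gap cluster by repeated minimum extraction over the bare
-- positions (selection with early exit) instead of A's full stable sort of the marker pairs.

-- Shared sub-expression of both Pythons: exact integer model of CPython's `int(text_len * 0.005)`
-- (0.005 is the double 5764607523034235/2^60; the product is rounded to nearest-even 53-bit double,
-- then truncated toward zero; exact for |text_len| ≤ 2^53 range, in particular on the domain).
def pyIntTimes005 (tl : Int) : Int :=
  if tl = 0 then 0
  else
    let q : Nat := (tl * 5764607523034235).natAbs
    let e : Nat := PySem.Int.bitLength (q : Int) - 1
    let d : Nat := 2 ^ (e - 52)
    let quo : Nat := q / d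
    let quo2 : Nat := if d < 2 * (q % d) ∨ (2 * (q % d) = d ∧ quo % 2 = 1) then quo + 1 else quo
    (if 0 < tl then 1 else -1) * ((quo2 >>> (112 - e) : Nat) : Int)

-- ===== PORT A =====
-- `for i in range(len(sm)-1): gap = sm[i+1][0]-sm[i][0]; if gap < max_gap: count += 1 else: break`
def loopA_detect (sm : List (Int × Option String)) (max_gap : Int) :
    List Int → Int → Int
  | [], cluster_count => cluster_count
  | i :: rest, cluster_count =>
    let gap := (PySem.List.pyGetD sm (i + 1) (0, none)).1 - (PySem.List.pyGetD sm i (0, none)).1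
    if gap < max_gap then loopA_detect sm max_gap rest (cluster_count + 1)
    else cluster_count

def detect_leading_toc_cluster_py (markers : List (Int × Option String)) (text_len : Int) : Int :=
  if (markers.length : Int) < 3 ∨ text_len = 0 then 0
  else
    let sorted_markers := PySem.List.sorted markers (fun x => x.1)
    let max_gap := max (pyIntTimes005 text_len) 200
    let cluster_count :=
      loopA_detect sorted_markers max_gap
        (PySem.List.pyRange 0 ((sorted_markers.length : Int) - 1) 1) 1
    if 3 ≤ cluster_count then
      (PySem.List.pyGetD sorted_markers (cluster_count - 1) (0, none)).1
    else 0

-- ===== PORT B =====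
-- `while remaining: cur = min(remaining); if cur - prev >= max_gap: break; remaining.remove(cur); …`
-- `remaining.remove(cur)` with cur ∈ remaining is `remaining.erase cur` (PySem.List.remove?_eq_some_erase).
def loopB_detect (max_gap : Int) : List Int → Int → Int → Int × Int
  | remaining, prev, count =>
    match h : PySem.List.min? remaining (fun y => y) with
    | none => (prev, count)
    | some cur =>
      if max_gap ≤ cur - prev then (prev, count)
      else loopB_detect max_gap (remaining.erase cur) cur (count + 1)
  termination_by remaining => remaining.length
  decreasing_by
    have hm := PySem.List.min?_mem h
    have h1 := List.length_erase_of_mem hm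
    have h2 := List.length_pos_of_mem hm
    omega

def detect_leading_toc_cluster_py_alt (markers : List (Int × Option String)) (text_len : Int) : Int :=
  if (markers.length : Int) < 3 ∨ text_len = 0 then 0
  else
    let max_gap := max (pyIntTimes005 text_len) 200
    let remaining := markers.map (fun m => m.1)
    match PySem.List.min? remaining (fun y => y) with
    | none => 0  -- unreachable: remaining has ≥ 3 elements here (Python's min of a nonempty list)
    | some prev =>
      let res := loopB_detect max_gap (remaining.erase prev) prev 1
      if 3 ≤ res.2 then res.1 else 0

-- ===== PRECONDITION & SPEC =====
def Spec_detect_leading_toc_cluster_py (markers : List (Int × Option String)) (text_len : Int) (out : Int) : Prop := out = detect_leading_toc_cluster_py_alt markers text_len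
instance (markers : List (Int × Option String)) (text_len : Int) (out : Int) : Decidable (Spec_detect_leading_toc_cluster_py markers text_len out) := by unfold Spec_detect_leading_toc_cluster_py; infer_instance

-- ===== CLAIM (what is proved, stated in full; the proofs are below) =====
def Claim_equal_detect_leading_toc_cluster_py : Prop := ∀ (markers : List (Int × Option String)) (text_len : Int), Dom_detect_leading_toc_cluster_py markers text_len → Spec_detect_leading_toc_cluster_py markers text_len (detect_leading_toc_cluster_py markers text_len)

-- ===== LEMMAS AND PROOFS =====

-- Abstract walk over the sorted position list that both loops implement.
def walkW (g : Int) : List Int → Int → Int → Int × Int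
  | [], prev, count => (prev, count)
  | cur :: rest, prev, count =>
    if cur - prev < g then walkW g rest cur (count + 1) else (prev, count)

theorem loopB_eq_walkW (g : Int) (S : List Int) :
    ∀ (remaining : List Int) (prev count : Int), S.Perm remaining →
      S.Pairwise (· ≤ ·) → loopB_detect g remaining prev count = walkW g S prev count := by
  induction S with
  | nil =>
    intro remaining prev count hp _
    have he : remaining = [] := hp.symm.eq_nil
    subst he
    rw [loopB_detect]
    rfl
  | cons s S' ih =>
    intro remaining prev count hp hs
    obtain ⟨cur, hcur⟩ : ∃ cur, PySem.List.min? remaining (fun y => y) = some cur := by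
      cases hmin : PySem.List.min? remaining (fun y => y) with
      | none =>
        exfalso
        have he : remaining = [] := (PySem.List.min?_eq_none_iff remaining (fun y => y)).mp hmin
        subst he
        simpa using hp.eq_nil
      | some c => exact ⟨c, rfl⟩
    have hcurmem : cur ∈ remaining := PySem.List.min?_mem hcur
    have hpc := List.pairwise_cons.mp hs
    have hscur : s = cur := by
      have h1 : cur ≤ s := PySem.List.min?_isMin hcur s (hp.mem_iff.mp (List.mem_cons_self))
      have h2 : s ≤ cur := by
        rcases List.mem_cons.mp (hp.mem_iff.mpr hcurmem) with h | h
        · omega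
        · exact hpc.1 cur h
      omega
    subst hscur
    rw [loopB_detect]
    have hperm' : S'.Perm (remaining.erase s) :=
      ((hp.trans (List.perm_cons_erase hcurmem)).cons_inv)
    rw [hcur]
    by_cases hgap : g ≤ s - prev
    · simp only [if_pos hgap, walkW]
      rw [if_neg (by omega)]
    · simp only [if_neg hgap, walkW]
      rw [if_pos (by omega)]
      exact ih (remaining.erase s) s (count + 1) hperm' hpc.2

theorem loopA_eq_walkW (sm : List (Int × Option String)) (g : Int) :
    ∀ (i : Nat), i < sm.length →
      ((PySem.List.pyGetD sm
          (loopA_detect sm g (PySem.List.pyRange (i : Int) ((sm.length : Int) - 1) 1) ((i : Int) + 1) - 1)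
          (0, none)).1,
        loopA_detect sm g (PySem.List.pyRange (i : Int) ((sm.length : Int) - 1) 1) ((i : Int) + 1))
      = walkW g ((sm.map (·.1)).drop (i + 1)) ((sm.map (·.1)).getD i 0) ((i : Int) + 1) := by
  intro i
  induction hk : sm.length - 1 - i generalizing i with
  | zero =>
    intro hi
    have hi' : i = sm.length - 1 := by omega
    rw [PySem.List.pyRange_one_eq_nil (by omega)]
    simp only [loopA_detect]
    have hdrop : (sm.map (·.1)).drop (i + 1) = [] := by
      apply List.drop_eq_nil_of_le; simp; omega
    rw [hdrop]
    simp only [walkW]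
    have h1 : (i : Int) + 1 - 1 = (i : Int) := by ring
    rw [h1, PySem.List.pyGetD_natCast]
    congr 1
    rw [List.getD_eq_getElem _ _ hi, List.getD_eq_getElem _ _ (by simp [hi]), List.getElem_map]
  | succ k ih =>
    intro hi
    have hlt : i < sm.length - 1 := by omega
    rw [PySem.List.pyRange_one_cons (by omega)]
    simp only [loopA_detect]
    have ht1 : ((i : Int) + 1).toNat = i + 1 := by omega
    have hgap1 : PySem.List.pyGetD sm ((i : Int) + 1) (0, (none : Option String))
        = sm[i + 1]'(by omega) := by
      rw [PySem.List.pyGetD_eq_getElem sm _ (by omega) (by omega)]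
      simp [ht1]
    have hgap0 : PySem.List.pyGetD sm ((i : Int)) (0, (none : Option String))
        = sm[i]'(by omega) := by
      rw [PySem.List.pyGetD_eq_getElem sm _ (by omega) (by omega)]
      simp
    have hdrop : (sm.map (·.1)).drop (i + 1)
        = (sm.map (·.1))[i + 1]'(by simp; omega) :: (sm.map (·.1)).drop (i + 1 + 1) :=
      (List.getElem_cons_drop (by simp; omega)).symm
    have hgetD0 : (sm.map (·.1)).getD i 0 = (sm.map (·.1))[i]'(by simp; omega) :=
      List.getD_eq_getElem _ _ (by simp; omega)
    have hgetD1 : (sm.map (·.1)).getD (i + 1) 0 = (sm.map (·.1))[i + 1]'(by simp; omega) :=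
      List.getD_eq_getElem _ _ (by simp; omega)
    rw [hgap1, hgap0, hdrop]
    simp only [walkW]
    rw [hgetD0]
    simp only [List.getElem_map]
    by_cases hg : (sm[i + 1]'(by omega)).1 - (sm[i]'(by omega)).1 < g
    · rw [if_pos hg, if_pos hg]
      have H := ih (i + 1) (by omega) (by omega)
      rw [hgetD1] at H
      simp only [List.getElem_map] at H
      push_cast at H
      exact H
    · rw [if_neg hg, if_neg hg]
      have h1 : (i : Int) + 1 - 1 = (i : Int) := by ring
      rw [h1, PySem.List.pyGetD_natCast]
      rw [List.getD_eq_getElem _ _ hi]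

-- ===== VERDICT (by name: the statement is the Claim_ definition above) =====
theorem detect_leading_toc_cluster_py_spec : Claim_equal_detect_leading_toc_cluster_py := by
  intro markers text_len _
  unfold Spec_detect_leading_toc_cluster_py
  unfold detect_leading_toc_cluster_py detect_leading_toc_cluster_py_alt
  by_cases hguard : (markers.length : Int) < 3 ∨ text_len = 0
  · rw [if_pos hguard, if_pos hguard]
  · rw [if_neg hguard, if_neg hguard]
    push Not at hguard
    have hlen3 : 3 ≤ markers.length := by omega
    set sm := PySem.List.sorted markers (fun x => x.1) with hsm
    have hlensm : sm.length = markers.length := PySem.List.length_sorted markers (fun x => x.1) false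
    set g := max (pyIntTimes005 text_len) 200 with hgdef
    set remaining := markers.map (fun m => m.1) with hrem
    have hperm : (sm.map (fun x => x.1)).Perm remaining :=
      (PySem.List.sorted_perm markers (fun x => x.1) false).map (fun x => x.1)
    have hpw : (sm.map (fun x => x.1)).Pairwise (· ≤ ·) :=
      PySem.List.sorted_map_key_pairwise markers (fun x => x.1)
    cases hpl : sm.map (fun x => x.1) with
    | nil =>
      exfalso
      have h0 : sm.length = 0 := by simpa using congrArg List.length hpl
      omega
    | cons p t =>
      rw [hpl] at hperm hpw
      -- the minimum B extracts first is the head of the sorted position list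
      obtain ⟨m, hmin⟩ : ∃ m, PySem.List.min? remaining (fun y => y) = some m := by
        cases hm : PySem.List.min? remaining (fun y => y) with
        | none =>
          exfalso
          have he : remaining = [] := (PySem.List.min?_eq_none_iff remaining (fun y => y)).mp hm
          rw [he] at hperm
          simpa using hperm.eq_nil
        | some c => exact ⟨c, rfl⟩
      have hmmem : m ∈ remaining := PySem.List.min?_mem hmin
      have hmp : m = p := by
        have h1 : m ≤ p := PySem.List.min?_isMin hmin p (hperm.mem_iff.mp (List.mem_cons_self))
        have h2 : p ≤ m := by
          rcases List.mem_cons.mp (hperm.mem_iff.mpr hmmem) with h | h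
          · omega
          · exact (List.pairwise_cons.mp hpw).1 m h
        omega
      -- A's loop is the walk over the sorted tail
      have hA := loopA_eq_walkW sm g 0 (by rw [hlensm]; omega)
      norm_num [hpl] at hA
      -- B's loop is the same walk
      subst hmp
      have hpermt : t.Perm (remaining.erase m) :=
        (hperm.trans (List.perm_cons_erase hmmem)).cons_inv
      have hB : loopB_detect g (remaining.erase m) m 1 = walkW g t m 1 :=
        loopB_eq_walkW g t (remaining.erase m) m 1 hpermt (List.pairwise_cons.mp hpw).2
      simp only [hmin, hB]
      rw [← hA]
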